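-- pv_equiv track=rewrite | github.com/alyxbb/Neaproject | game.py | get_first_letters
-- ===== SOURCE A (Python) =====
-- def get_first_letters(phrase):  # returns the phrase with only the first character in each sentence shown
--     should_be_shown = True  # should the next character be shown
--     returned_phrase = ""
--
--     for letter in phrase:
--         if letter == " ":
--             returned_phrase += " "
--             should_be_shown = True  # if there's a space the next character should be shown
--
--         elif should_be_shown:
--             returned_phrase += letter
--             should_be_shown = False  # add the character
--
--         else:
--             returned_phrase += "-"  # put * in place of the character
--
--     return returned_phrase
-- ===== SOURCE B (Python) =====
-- def get_first_letters(phrase):  # returns the phrase with only the first character in each word shown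
--     words = phrase.split(" ")
--     return " ".join(w[0] + "-" * (len(w) - 1) if w else "" for w in words)
-- ===== Notes on version B (the rewrite author's own statement) =====
-- stated objective: idiomatic
-- what changed: Replaces the flag-threaded character-by-character scan with a tokenize/map/join decomposition: split the phrase on single spaces, turn each word into its first letter followed by dashes, and rejoin with spaces.
import Mathlib
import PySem

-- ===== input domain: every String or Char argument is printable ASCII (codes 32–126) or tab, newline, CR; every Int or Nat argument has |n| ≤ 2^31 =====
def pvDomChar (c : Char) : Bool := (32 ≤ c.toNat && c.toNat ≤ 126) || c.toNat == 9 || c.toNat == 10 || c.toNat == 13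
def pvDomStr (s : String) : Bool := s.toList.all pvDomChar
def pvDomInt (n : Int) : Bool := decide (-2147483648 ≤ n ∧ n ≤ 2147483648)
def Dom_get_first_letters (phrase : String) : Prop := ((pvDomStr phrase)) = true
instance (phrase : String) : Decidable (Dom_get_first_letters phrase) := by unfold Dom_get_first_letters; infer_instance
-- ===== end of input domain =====

-- B replaces A's flag-threaded character scan by an idiomatic split-on-space / map-each-word / join decomposition; return values provably equal on all inputs.

-- ===== PORT A =====
-- state: (returned_phrase, should_be_shown); returned_phrase built left to right
def get_first_letters (phrase : String) : String :=
  String.ofList (phrase.toList.foldl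
    (fun (st : List Char × Bool) letter =>
      if letter = ' ' then (st.1 ++ [' '], true)
      else if st.2 then (st.1 ++ [letter], false)
      else (st.1 ++ ['-'], false))
    ([], true)).1

-- ===== PORT B =====
-- w[0] + "-" * (len(w) - 1) if w else ""
def gflWord (w : List Char) : List Char :=
  match w with
  | [] => []
  | c :: rest => c :: List.replicate rest.length '-'

def get_first_letters_alt (phrase : String) : String :=
  String.ofList (PySem.Chars.join [' ']
    ((PySem.Chars.splitOn phrase.toList [' ']).map gflWord))

-- ===== PRECONDITION & SPEC =====
def Spec_get_first_letters (phrase : String) (out : String) : Prop := out = get_first_letters_alt phrase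
instance (phrase : String) (out : String) : Decidable (Spec_get_first_letters phrase out) := by unfold Spec_get_first_letters; infer_instance

-- ===== CLAIM (what is proved, stated in full; the proofs are below) =====
def Claim_equal_get_first_letters : Prop := ∀ (phrase : String), Dom_get_first_letters phrase → Spec_get_first_letters phrase (get_first_letters phrase)

-- ===== LEMMAS AND PROOFS =====

-- simple structural characterisation of split on a single space
def splitSp : List Char → List (List Char)
  | [] => [[]]
  | c :: cs =>
    if c = ' ' then [] :: splitSp cs
    else
      match splitSp cs with
      | [] => [[c]]  -- unreachable: splitSp never returns []
      | w :: ws => (c :: w) :: ws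

theorem splitSp_ne_nil (cs : List Char) : splitSp cs ≠ [] := by
  cases cs with
  | nil => simp [splitSp]
  | cons c cs =>
    simp only [splitSp]
    split
    · simp
    · split <;> simp

-- the join of everything after the first word, each piece preceded by its separating space
def tailJ (ws : List (List Char)) : List Char :=
  (ws.map (fun w => ' ' :: gflWord w)).flatten

theorem go_spec (fuel : Nat) (l cur : List Char) (acc : List (List Char))
    (h : l.length < fuel) :
    PySem.Chars.splitOn.go [' '] fuel l cur acc
      = acc.reverse ++ (match splitSp l with
          | [] => [cur.reverse]
          | w :: ws => (cur.reverse ++ w) :: ws) := by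
  induction fuel generalizing l cur acc with
  | zero => omega
  | succ fuel ih =>
    cases l with
    | nil => simp [PySem.Chars.splitOn.go, splitSp]
    | cons c rest =>
      by_cases hc : c = ' '
      · subst hc
        have : PySem.Chars.splitOn.go [' '] (fuel+1) (' ' :: rest) cur acc
            = PySem.Chars.splitOn.go [' '] fuel rest [] (cur.reverse :: acc) := by
          simp [PySem.Chars.splitOn.go, List.isPrefixOf]
        rw [this, ih rest [] (cur.reverse :: acc) (by simpa using Nat.lt_of_succ_lt_succ h)]
        cases hs : splitSp rest with
        | nil => exact absurd hs (splitSp_ne_nil rest)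
        | cons w ws => simp [splitSp, hs]
      · have : PySem.Chars.splitOn.go [' '] (fuel+1) (c :: rest) cur acc
            = PySem.Chars.splitOn.go [' '] fuel rest (c :: cur) acc := by
          simp [PySem.Chars.splitOn.go, List.isPrefixOf, Ne.symm hc]
        rw [this, ih rest (c :: cur) acc (by simpa using Nat.lt_of_succ_lt_succ h)]
        cases hs : splitSp rest with
        | nil => exact absurd hs (splitSp_ne_nil rest)
        | cons w ws => simp [splitSp, hc, hs]

theorem splitOn_eq_splitSp (cs : List Char) :
    PySem.Chars.splitOn cs [' '] = splitSp cs := by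
  have h := go_spec (cs.length + 1) cs [] [] (by omega)
  cases hs : splitSp cs with
  | nil => exact absurd hs (splitSp_ne_nil cs)
  | cons w ws =>
    rw [hs] at h
    simpa [PySem.Chars.splitOn] using h

theorem join_cons (x : List Char) (xs : List (List Char)) :
    PySem.Chars.join [' '] (x :: xs) = x ++ (xs.map (fun y => ' ' :: y)).flatten := by
  induction xs generalizing x with
  | nil => simp [PySem.Chars.join_singleton]
  | cons y ys ih =>
    rw [PySem.Chars.join_cons_cons, ih y]
    simp

-- loop invariant: A's fold from flag b emits the first word of splitSp (shown if b, dashed if not) then the rest spaced and dashed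
theorem fold_spec (cs : List Char) (acc : List Char) (b : Bool) :
    (cs.foldl
      (fun (st : List Char × Bool) letter =>
        if letter = ' ' then (st.1 ++ [' '], true)
        else if st.2 then (st.1 ++ [letter], false)
        else (st.1 ++ ['-'], false))
      (acc, b)).1
    = acc ++ (match splitSp cs with
        | [] => []
        | w :: ws => (if b then gflWord w else List.replicate w.length '-') ++ tailJ ws) := by
  induction cs generalizing acc b with
  | nil => cases b <;> simp [splitSp, gflWord, tailJ]
  | cons c cs ih =>
    cases hs : splitSp cs with
    | nil => exact absurd hs (splitSp_ne_nil cs)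
    | cons w ws =>
      by_cases hc : c = ' '
      · subst hc
        have h2 := ih (acc ++ [' ']) true
        rw [hs] at h2
        simp only [List.foldl_cons, reduceIte] at h2 ⊢
        rw [h2]
        cases b <;> simp [splitSp, hs, gflWord, tailJ]
      · cases b with
        | true =>
          have h2 := ih (acc ++ [c]) false
          rw [hs] at h2
          simp only [List.foldl_cons, if_neg hc, reduceIte] at h2 ⊢
          rw [h2]
          simp [splitSp, hc, hs, gflWord]
        | false =>
          have h2 := ih (acc ++ ['-']) false
          rw [hs] at h2
          simp only [List.foldl_cons, if_neg hc, Bool.false_eq_true, ite_false] at h2 ⊢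
          rw [h2]
          simp [splitSp, hc, hs, List.replicate_succ]

-- ===== VERDICT (by name: the statement is the Claim_ definition above) =====
theorem get_first_letters_spec : Claim_equal_get_first_letters := by
  intro phrase _
  unfold Spec_get_first_letters get_first_letters get_first_letters_alt
  rw [splitOn_eq_splitSp]
  have h := fold_spec phrase.toList [] true
  cases hs : splitSp phrase.toList with
  | nil => exact absurd hs (splitSp_ne_nil phrase.toList)
  | cons w ws =>
    rw [hs] at h
    rw [h]
    simp [join_cons, tailJ, List.map_map, Function.comp_def]
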